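-- pv_equiv track=rewrite | github.com/mudouble/python_practice | coding/0822.py | count_consecutive_brand
-- ===== SOURCE A (Python) =====
-- def count_consecutive_brand(data):
--     count=0
--     for i in range(len(data)-1):
--         if data[i]==data[i+1]:
--             count+=1
--             if count == 2:
--                 return i+1
--         else:
--             count=0
--     return -1
-- ===== SOURCE B (Python) =====
-- from itertools import groupby
--
-- def count_consecutive_brand(data):
--     offset = 0
--     for _, g in groupby(data):
--         run_len = sum(1 for _ in g)
--         if run_len >= 3:
--             return offset + 2
--         offset += run_len
--     return -1
-- ===== Notes on version B (the rewrite author's own statement) =====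
-- stated objective: idiomatic
-- what changed: Replaces the index-based adjacent-pair counter with itertools.groupby over maximal runs, returning offset+2 for the first run of length >= 3.
import Mathlib
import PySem

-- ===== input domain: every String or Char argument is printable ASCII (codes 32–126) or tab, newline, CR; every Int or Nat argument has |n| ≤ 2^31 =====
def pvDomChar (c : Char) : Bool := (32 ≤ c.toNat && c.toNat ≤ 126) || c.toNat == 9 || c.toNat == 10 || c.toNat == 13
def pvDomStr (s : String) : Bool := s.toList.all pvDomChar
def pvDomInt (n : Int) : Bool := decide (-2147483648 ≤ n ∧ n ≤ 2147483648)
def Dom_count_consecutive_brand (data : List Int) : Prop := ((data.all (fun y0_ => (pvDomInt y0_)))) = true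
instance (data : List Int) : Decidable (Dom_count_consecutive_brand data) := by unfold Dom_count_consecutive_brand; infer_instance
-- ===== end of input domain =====

-- B replaces A's index-based adjacent-pair counter with a groupby-style scan over maximal runs (idiomatic; return value only).


-- ===== PORT A =====
-- A's loop over i ∈ range(len(data)-1) comparing data[i] with data[i+1]: ported as the
-- obvious structural recursion over the list of the second elements of each pair, with the
-- same state (count) and idx tracking Python's i+1 (the index of the current element).
def scanA (prev : Int) (count : Int) (ys : List Int) (idx : Int) : Int :=
  match ys with
  | [] => -1
  | y :: ys' =>
    if prev = y then
      if count + 1 = 2 then idx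
      else scanA y (count + 1) ys' (idx + 1)
    else scanA y 0 ys' (idx + 1)

def count_consecutive_brand (data : List Int) : Int :=
  match data with
  | [] => -1
  | x :: xs => scanA x 0 xs 1

-- ===== PORT B =====
-- B: groupby over maximal runs; takeWhile/dropWhile split off the leading run (= one groupby group).
def goB (data : List Int) (offset : Int) : Int :=
  match data with
  | [] => -1
  | x :: xs =>
    let run := xs.takeWhile (fun y => y == x)
    let rest := xs.dropWhile (fun y => y == x)
    let l : Nat := 1 + run.length
    if 3 ≤ l then offset + 2 else goB rest (offset + (l : Int))
termination_by data.length
decreasing_by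
  simp only [List.length_cons]
  exact Nat.lt_succ_of_le (List.length_dropWhile_le _ _)

def count_consecutive_brand_alt (data : List Int) : Int := goB data 0

-- ===== PRECONDITION & SPEC =====
def Spec_count_consecutive_brand (data : List Int) (out : Int) : Prop := out = count_consecutive_brand_alt data
instance (data : List Int) (out : Int) : Decidable (Spec_count_consecutive_brand data out) := by unfold Spec_count_consecutive_brand; infer_instance

-- ===== CLAIM (what is proved, stated in full; the proofs are below) =====
def Claim_equal_count_consecutive_brand : Prop := ∀ (data : List Int), Dom_count_consecutive_brand data → Spec_count_consecutive_brand data (count_consecutive_brand data)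

-- ===== LEMMAS AND PROOFS =====

-- Unfolding lemmas for goB on the run shapes that appear in the invariant proof.
theorem goB_cons_ne (x y : Int) (ys : List Int) (o : Int) (h : y ≠ x) :
    goB (x :: y :: ys) o = goB (y :: ys) (o + 1) := by
  rw [goB]; simp [h]

theorem goB_cons2_ne (x y : Int) (ys : List Int) (o : Int) (h : y ≠ x) :
    goB (x :: x :: y :: ys) o = goB (y :: ys) (o + 2) := by
  rw [goB]; simp [h]

theorem goB_run3 (x : Int) (ys : List Int) (o : Int) :
    goB (x :: x :: x :: ys) o = o + 2 := by
  rw [goB]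
  split
  · rfl
  · next h => exfalso; simp at h; omega

-- Key invariant, proved mutually by strong induction on the tail length:
-- with count = 0, scanning ys after prev (at index o+1) equals B's run scan of prev::ys from offset o;
-- with count = 1, it equals B's run scan of prev::prev::ys from offset o.
theorem scanA_goB (n : Nat) : ∀ (ys : List Int), ys.length ≤ n → ∀ (prev o : Int),
    scanA prev 0 ys (o + 1) = goB (prev :: ys) o ∧
    scanA prev 1 ys (o + 2) = goB (prev :: prev :: ys) o := by
  induction n with
  | zero =>
    intro ys hlen prev o
    have h : ys = [] := List.eq_nil_of_length_eq_zero (Nat.le_zero.mp hlen)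
    subst h
    constructor <;> simp [scanA, goB]
  | succ n ih =>
    intro ys hlen prev o
    match ys with
    | [] => constructor <;> simp [scanA, goB]
    | y :: ys' =>
      have hlen' : ys'.length ≤ n := by
        simpa [List.length_cons, Nat.succ_le_succ_iff] using hlen
      constructor
      · by_cases hxy : prev = y
        · subst hxy
          have h2 : o + 1 + 1 = o + 2 := by ring
          have := (ih ys' hlen' prev o).2
          simpa [scanA, h2] using this
        · have hih := (ih ys' hlen' y (o + 1)).1
          have hrw : scanA prev 0 (y :: ys') (o + 1) = scanA y 0 ys' (o + 1 + 1) := by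
            simp [scanA, hxy]
          rw [hrw, hih, goB_cons_ne prev y ys' o (Ne.symm hxy)]
      · by_cases hxy : prev = y
        · subst hxy
          have hrw : scanA prev 1 (prev :: ys') (o + 2) = o + 2 := by simp [scanA]
          rw [hrw, goB_run3]
        · have hih := (ih ys' hlen' y (o + 2)).1
          have hrw : scanA prev 1 (y :: ys') (o + 2) = scanA y 0 ys' (o + 2 + 1) := by
            simp [scanA, hxy]
          rw [hrw, hih, goB_cons2_ne prev y ys' o (Ne.symm hxy)]

-- ===== VERDICT (by name: the statement is the Claim_ definition above) =====
theorem count_consecutive_brand_spec : Claim_equal_count_consecutive_brand := by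
  intro data _
  unfold Spec_count_consecutive_brand count_consecutive_brand count_consecutive_brand_alt
  match data with
  | [] => simp [goB]
  | x :: xs =>
    have h := (scanA_goB xs.length xs (le_refl _) x 0).1
    simpa using h
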